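-- pv_equiv track=rewrite | github.com/CarsonScott/Intelligent-Logical-Framing | src/Mapper.py | urgency
-- ===== SOURCE A (Python) =====
-- def union(x):
-- 	y = []
-- 	for i in range(len(x)):
-- 		for j in range(len(x[i])):
-- 			if x[i][j] not in y:
-- 				y.append(x[i][j])
-- 	return y
--
-- def frequency(domains, values):
-- 	y = []
-- 	for i in range(len(values)):
-- 		y.append([])
-- 		for j in range(len(domains)):
-- 			if values[i] in domains[j]:
-- 				y[i].append(j)
-- 	return y
--
-- def urgency(domains):
-- 	y = []
-- 	values = union(domains)
-- 	overlap = frequency(domains, values)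
-- 	for i in range(len(values)):
-- 		y.append(0)
-- 		for j in range(len(overlap[i])):
-- 			d = overlap[i][j]
-- 			y[i] += 1
-- 	return y
-- ===== SOURCE B (Python) =====
-- def urgency(domains):
--     # One pass: ordered counter keyed by first appearance; each domain's
--     # distinct values (dict.fromkeys) bump their count once per domain.
--     counts = {}
--     for dom in domains:
--         for v in dict.fromkeys(dom):
--             counts[v] = counts.get(v, 0) + 1
--     return list(counts.values())
-- ===== Notes on version B (the rewrite author's own statement) =====
-- stated objective: faster
-- what changed: Replaces the three quadratic index-loop passes (union with linear membership scans, per-value scan of all domains, then recounting) by a single pass over the domains maintaining an insertion-ordered counter dict keyed by each domain's distinct values.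
import Mathlib
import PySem

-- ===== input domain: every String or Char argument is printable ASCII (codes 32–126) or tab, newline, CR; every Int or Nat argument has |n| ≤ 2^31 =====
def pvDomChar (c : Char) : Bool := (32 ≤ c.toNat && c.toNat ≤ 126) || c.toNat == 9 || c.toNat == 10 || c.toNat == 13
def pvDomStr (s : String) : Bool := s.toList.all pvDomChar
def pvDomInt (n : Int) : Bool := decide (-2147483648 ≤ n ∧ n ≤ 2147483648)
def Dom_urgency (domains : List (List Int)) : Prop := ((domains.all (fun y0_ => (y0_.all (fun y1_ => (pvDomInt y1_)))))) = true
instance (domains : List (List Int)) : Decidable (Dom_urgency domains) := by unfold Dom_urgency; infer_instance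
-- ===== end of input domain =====

-- B replaces A's three quadratic index-loop passes by a single pass over the
-- domains maintaining an insertion-ordered counter dict (measured asymptotically faster).


-- ===== PORT A =====
-- union(x): nested index loops (ported via pyRange/pyGetD, all indices provably in range),
-- membership test before append
def pyUnion (x : List (List Int)) : List Int :=
  (PySem.List.pyRange 0 x.length 1).foldl (fun y i =>
    (PySem.List.pyRange 0 (PySem.List.pyGetD x i []).length 1).foldl (fun y j =>
      if PySem.List.pyGetD (PySem.List.pyGetD x i []) j 0 ∈ y then y
      else y ++ [PySem.List.pyGetD (PySem.List.pyGetD x i []) j 0]) y) []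

-- frequency(domains, values): y.append([]) then y[i].append(j) on hits (y[i] = pySetD)
def pyFrequency (domains : List (List Int)) (values : List Int) : List (List Int) :=
  (PySem.List.pyRange 0 values.length 1).foldl (fun y i =>
    (PySem.List.pyRange 0 domains.length 1).foldl (fun y j =>
      if PySem.List.pyGetD values i 0 ∈ PySem.List.pyGetD domains j [] then
        PySem.List.pySetD y i (PySem.List.pyGetD y i [] ++ [j])
      else y) (y ++ [[]])) []

-- urgency(domains): y.append(0) then y[i] += 1 once per j in range(len(overlap[i]))
def urgency (domains : List (List Int)) : List Int :=
  let values := pyUnion domains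
  let overlap := pyFrequency domains values
  (PySem.List.pyRange 0 values.length 1).foldl (fun y i =>
    (PySem.List.pyRange 0 (PySem.List.pyGetD overlap i []).length 1).foldl (fun y _j =>
      PySem.List.pySetD y i (PySem.List.pyGetD y i 0 + 1)) (y ++ [0])) []

-- ===== PORT B =====
-- one pass: counts[v] = counts.get(v, 0) + 1 for each distinct v (dict.fromkeys = dedup) of each domain
def urgency_alt (domains : List (List Int)) : List Int :=
  (domains.foldl (fun counts dom =>
      (PySem.List.dedup dom).foldl (fun counts v => counts.insert v (counts.getD v 0 + 1)) counts)
    PySem.Dict.empty).values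

-- ===== PRECONDITION & SPEC =====
def Spec_urgency (domains : List (List Int)) (out : List Int) : Prop := out = urgency_alt domains
instance (domains : List (List Int)) (out : List Int) : Decidable (Spec_urgency domains out) := by unfold Spec_urgency; infer_instance

-- ===== CLAIM (what is proved, stated in full; the proofs are below) =====
def Claim_equal_urgency : Prop := ∀ (domains : List (List Int)), Dom_urgency domains → Spec_urgency domains (urgency domains)

-- ===== LEMMAS AND PROOFS =====

-- the row frequency() builds for one value v
def rowOf (domains : List (List Int)) (v : Int) : List Int :=
  (PySem.List.pyRange 0 (domains.length : Int) 1).foldl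
    (fun r j => if v ∈ PySem.List.pyGetD domains j [] then r ++ [j] else r) []

-- A's union is Set.ofList of the concatenation
lemma pyUnion_eq (x : List (List Int)) :
    pyUnion x = PySem.Set.ofList x.flatten := by
  unfold pyUnion
  rw [PySem.List.foldl_pyRange_zero_pyGetD' x [] (fun y dom =>
    (PySem.List.pyRange 0 dom.length 1).foldl (fun y j =>
      if PySem.List.pyGetD dom j 0 ∈ y then y else y ++ [PySem.List.pyGetD dom j 0]) y) []]
  have h1 : ∀ (dom : List Int) (y : List Int),
      (PySem.List.pyRange 0 dom.length 1).foldl (fun y j =>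
        if PySem.List.pyGetD dom j 0 ∈ y then y else y ++ [PySem.List.pyGetD dom j 0]) y
      = dom.foldl PySem.Set.add y := by
    intro dom y
    rw [PySem.List.foldl_pyRange_zero_pyGetD' dom 0 (fun y v => if v ∈ y then y else y ++ [v]) y]
    induction dom generalizing y with
    | nil => rfl
    | cons a l ih => simp only [List.foldl_cons, ih, PySem.Set.add_eq_ite]
  simp only [h1]
  rw [PySem.Set.ofList_eq_foldl, ← List.foldl_flatten]

-- B's dict equals the counter of the dedup-concatenation
lemma alt_dict_eq (domains : List (List Int)) :
    (domains.foldl (fun counts dom =>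
        (PySem.List.dedup dom).foldl (fun counts v => counts.insert v (counts.getD v 0 + 1)) counts)
      PySem.Dict.empty)
    = PySem.Dict.counter (domains.flatMap (fun dom => PySem.List.dedup dom)) := by
  rw [← PySem.Dict.foldl_insert_getD_add_one_eq_counter, List.foldl_flatMap]

-- folding Set.add over an already-deduplicated list adds the same elements
lemma update_foldl_add (xs : List Int) : ∀ (s t : List Int),
    PySem.Set.update s (xs.foldl PySem.Set.add t) = PySem.Set.update (PySem.Set.update s t) xs := by
  induction xs with
  | nil => intro s t; rfl
  | cons x l ih =>
    intro s t
    have hmid : PySem.Set.update s (PySem.Set.add t x) = PySem.Set.add (PySem.Set.update s t) x := by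
      by_cases hx : x ∈ t
      · rw [PySem.Set.add_of_mem hx, PySem.Set.add_of_mem]
        simp [PySem.Set.mem_update, hx]
      · rw [PySem.Set.add_of_not_mem hx]
        simp [PySem.Set.update, List.foldl_append]
    show PySem.Set.update s (l.foldl PySem.Set.add (PySem.Set.add t x)) = _
    rw [ih s (PySem.Set.add t x), hmid]
    rfl

lemma update_dedup (xs s : List Int) :
    PySem.Set.update s (PySem.List.dedup xs) = PySem.Set.update s xs := by
  have h : PySem.List.dedup xs = xs.foldl PySem.Set.add [] := by
    simp [PySem.List.dedup_eq_ofList, PySem.Set.ofList_eq_foldl]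
  rw [h, update_foldl_add]
  rfl

lemma ofList_flatMap_dedup (domains : List (List Int)) :
    PySem.Set.ofList (domains.flatMap (fun dom => PySem.List.dedup dom))
      = PySem.Set.ofList domains.flatten := by
  simp only [PySem.Set.ofList_eq_foldl, List.foldl_flatMap, List.foldl_flatten]
  suffices h : ∀ s : List Int, domains.foldl (fun b xs => (PySem.List.dedup xs).foldl PySem.Set.add b) s
      = domains.foldl (fun b xs => xs.foldl PySem.Set.add b) s from h []
  induction domains with
  | nil => intro s; rfl
  | cons d l ih =>
    intro s
    simp only [List.foldl_cons]
    rw [show (PySem.List.dedup d).foldl PySem.Set.add s = d.foldl PySem.Set.add s from update_dedup d s, ih]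

-- counting a value in the dedup-concatenation counts the domains containing it
lemma count_flatMap_dedup (domains : List (List Int)) (v : Int) :
    (domains.flatMap (fun dom => PySem.List.dedup dom)).count v
      = domains.countP (fun dom => decide (v ∈ dom)) := by
  induction domains with
  | nil => rfl
  | cons d l ih =>
    rw [List.flatMap_cons, List.count_append, List.countP_cons, ih]
    by_cases hv : v ∈ d
    · rw [List.count_eq_one_of_mem (PySem.List.nodup_dedup d) (by simpa [PySem.List.mem_dedup] using hv)]
      simp [hv, Nat.add_comm]
    · rw [List.count_eq_zero.mpr (by simpa [PySem.List.mem_dedup] using hv)]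
      simp [hv]

-- generic "append a fresh slot, then mutate only that slot" index loop
lemma foldl_range_build {α : Type} (f : Nat → α) (step : List α → Int → List α) :
    ∀ (n : Nat),
    (∀ (k : Nat), k < n → ∀ y : List α, y.length = k → step y (k : Int) = y ++ [f k]) →
    (PySem.List.pyRange 0 (n : Int) 1).foldl step [] = (List.range n).map f := by
  intro n
  induction n with
  | zero => intro _; rfl
  | succ m ih =>
    intro hstep
    have h1 : PySem.List.pyRange 0 ((m + 1 : Nat) : Int) 1
        = PySem.List.pyRange 0 (m : Int) 1 ++ [(m : Int)] := by
      push_cast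
      exact PySem.List.pyRange_one_succ_right (by positivity)
    rw [h1, List.foldl_append, ih (fun k hk => hstep k (Nat.lt_succ_of_lt hk))]
    simp only [List.foldl_cons, List.foldl_nil]
    rw [hstep m (Nat.lt_succ_self m) _ (by simp), List.range_succ, List.map_append]
    rfl

-- the y[i].append(j) inner loop of frequency(), acting on the freshly appended last row
lemma inner_row (P : Int → Prop) [DecidablePred P] (js : List Int) :
    ∀ (pre : List (List Int)) (row : List Int),
    js.foldl (fun y j => if P j then
        PySem.List.pySetD y (pre.length : Int) (PySem.List.pyGetD y (pre.length : Int) [] ++ [j])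
      else y) (pre ++ [row])
      = pre ++ [js.foldl (fun r j => if P j then r ++ [j] else r) row] := by
  induction js with
  | nil => intro pre row; rfl
  | cons j l ih =>
    intro pre row
    simp only [List.foldl_cons]
    by_cases hp : P j
    · rw [if_pos hp, if_pos hp]
      have hget : PySem.List.pyGetD (pre ++ [row]) (pre.length : Int) [] = row := by
        simp [PySem.List.pyGetD_natCast]
      have hset : PySem.List.pySetD (pre ++ [row]) (pre.length : Int) (row ++ [j]) = pre ++ [row ++ [j]] := by
        simp [PySem.List.pySetD_natCast, List.set_append_right]
      rw [hget, hset, ih pre (row ++ [j])]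
    · rw [if_neg hp, if_neg hp, ih pre row]

-- the y[i] += 1 inner loop of urgency(), acting on the freshly appended last slot
lemma inner_incr {β : Type} (l : List β) : ∀ (pre : List Int) (v : Int),
    l.foldl (fun y _ =>
        PySem.List.pySetD y (pre.length : Int) (PySem.List.pyGetD y (pre.length : Int) 0 + 1)) (pre ++ [v])
      = pre ++ [v + l.length] := by
  induction l with
  | nil => intro pre v; simp
  | cons b l ih =>
    intro pre v
    simp only [List.foldl_cons]
    have hget : PySem.List.pyGetD (pre ++ [v]) (pre.length : Int) 0 = v := by
      simp [PySem.List.pyGetD_natCast]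
    have hset : PySem.List.pySetD (pre ++ [v]) (pre.length : Int) (v + 1) = pre ++ [v + 1] := by
      simp [PySem.List.pySetD_natCast, List.set_append_right]
    rw [hget, hset, ih pre (v + 1)]
    simp only [List.length_cons]
    push_cast
    ring_nf

-- an index loop reading xs[k] is a map over xs
lemma map_range_get {α β : Type} (xs : List α) (d : α) (F : α → β) :
    (List.range xs.length).map (fun (k : Nat) => F (PySem.List.pyGetD xs ((k : Nat) : Int) d)) = xs.map F := by
  apply List.ext_getElem
  · simp
  · intro i h1 h2
    simp only [List.getElem_map, List.getElem_range]
    simp only [List.length_map, List.length_range] at h1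
    rw [PySem.List.pyGetD_natCast, List.getD_eq_getElem xs d h1]

lemma countP_pyRange (domains : List (List Int)) (v : Int) :
    ((PySem.List.pyRange 0 (domains.length : Int) 1).filter
        (fun j => decide (v ∈ PySem.List.pyGetD domains j []))).length
      = domains.countP (fun dom => decide (v ∈ dom)) := by
  rw [← List.countP_eq_length_filter]
  conv_rhs => rw [← PySem.List.map_pyGetD_pyRange_zero' domains [], List.countP_map]
  rfl

lemma pyFrequency_eq (domains : List (List Int)) (values : List Int) :
    pyFrequency domains values = values.map (rowOf domains) := by
  unfold pyFrequency
  rw [foldl_range_build (fun k => rowOf domains (PySem.List.pyGetD values ((k : Nat) : Int) 0)) _ values.length ?_]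
  · exact map_range_get values 0 (rowOf domains)
  · intro k _hk y hy
    subst hy
    exact inner_row (fun j => PySem.List.pyGetD values ((y.length : Nat) : Int) 0 ∈ PySem.List.pyGetD domains j [])
      (PySem.List.pyRange 0 (domains.length : Int) 1) y []

lemma rowOf_length (domains : List (List Int)) (v : Int) :
    (rowOf domains v).length = domains.countP (fun dom => decide (v ∈ dom)) := by
  unfold rowOf
  have h : (fun (r : List Int) (j : Int) => if v ∈ PySem.List.pyGetD domains j [] then r ++ [j] else r)
      = (fun (r : List Int) (j : Int) =>
          if (fun j => decide (v ∈ PySem.List.pyGetD domains j [])) j = true then r ++ [id j] else r) := by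
    funext r j; simp
  rw [h, PySem.List.foldl_append_if]
  simpa using countP_pyRange domains v

lemma urgency_eq (domains : List (List Int)) :
    urgency domains = (pyUnion domains).map
      (fun v => ((domains.countP (fun dom => decide (v ∈ dom)) : Nat) : Int)) := by
  unfold urgency
  have hlen : (pyUnion domains).length = (pyFrequency domains (pyUnion domains)).length := by
    rw [pyFrequency_eq, List.length_map]
  rw [foldl_range_build
        (fun k => ((PySem.List.pyGetD (pyFrequency domains (pyUnion domains)) ((k : Nat) : Int) []).length : Int))
        _ (pyUnion domains).length ?_]
  · rw [hlen, map_range_get (pyFrequency domains (pyUnion domains)) [] (fun r => (r.length : Int)),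
        pyFrequency_eq, List.map_map]
    refine List.map_congr_left ?_
    intro v _
    simp [Function.comp, rowOf_length]
  · intro k _hk y hy
    subst hy
    rw [inner_incr (PySem.List.pyRange 0 ((PySem.List.pyGetD (pyFrequency domains (pyUnion domains)) ((y.length : Nat) : Int) []).length : Int) 1) y 0]
    simp [PySem.List.length_pyRange_one]

lemma urgency_alt_eq (domains : List (List Int)) :
    urgency_alt domains = (PySem.Set.ofList domains.flatten).map
      (fun v => ((domains.countP (fun dom => decide (v ∈ dom)) : Nat) : Int)) := by
  unfold urgency_alt
  rw [alt_dict_eq,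
      PySem.Dict.values_eq_map_keys _ (PySem.Dict.nodup_keys_counter _) 0,
      PySem.Dict.keys_counter]
  simp only [PySem.Dict.getD_counter, count_flatMap_dedup, ofList_flatMap_dedup]

-- ===== VERDICT (by name: the statement is the Claim_ definition above) =====
theorem urgency_spec : Claim_equal_urgency := by
  intro domains _
  unfold Spec_urgency
  rw [urgency_eq, urgency_alt_eq, pyUnion_eq]
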